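-- pv_equiv track=rewrite | github.com/nanasi-apps/transcriber | backend/src/transcriber/merge.py | _split_text_units
-- ===== SOURCE A (Python) =====
-- _TERMINAL_PUNCTUATION = ("\u3002", "\uff01", "\uff1f", "!", "?", "\n")
--
-- def _split_text_units(text: str) -> list[str]:
--     units: list[str] = []
--     current = ""
--
--     for char in text:
--         current += char
--         if char in _TERMINAL_PUNCTUATION or char == "\n":
--             units.append(current.strip())
--             current = ""
--
--     if current.strip():
--         units.append(current.strip())
--
--     return units or [text]
-- ===== SOURCE B (Python) =====
-- _TERMINAL_PUNCTUATION = ("\u3002", "\uff01", "\uff1f", "!", "?", "\n")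
--
-- def _split_text_units(text: str) -> list[str]:
--     # Tokenize back-to-front into terminal-delimited segments, then strip.
--     rsegs = [[]]                      # segments in reverse order; each holds its chars in reverse
--     for ch in reversed(text):
--         if ch in _TERMINAL_PUNCTUATION:
--             rsegs.append([ch])
--         else:
--             rsegs[-1].append(ch)
--     segs = [''.join(reversed(s)) for s in reversed(rsegs)]
--     units = [seg.strip() for seg in segs[:-1]]
--     tail = segs[-1].strip()
--     if tail:
--         units.append(tail)
--     return units or [text]
-- ===== Notes on version B (the rewrite author's own statement) =====
-- stated objective: alternative
-- what changed: B tokenizes the text back-to-front into terminal-delimited segments (built as char lists) and strips/assembles them afterwards, instead of A's forward loop that accumulates a growing pending string and emits a stripped unit at each terminal.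
import Mathlib
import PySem

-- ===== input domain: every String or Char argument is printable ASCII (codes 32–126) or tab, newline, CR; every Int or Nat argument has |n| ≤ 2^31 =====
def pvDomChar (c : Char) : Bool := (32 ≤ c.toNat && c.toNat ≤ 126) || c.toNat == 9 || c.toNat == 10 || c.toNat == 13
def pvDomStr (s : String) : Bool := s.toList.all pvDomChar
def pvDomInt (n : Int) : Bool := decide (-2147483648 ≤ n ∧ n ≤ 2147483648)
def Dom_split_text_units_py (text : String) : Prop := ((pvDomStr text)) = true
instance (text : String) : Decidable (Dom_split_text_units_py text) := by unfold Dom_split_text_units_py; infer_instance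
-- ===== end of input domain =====

-- B tokenizes the text back-to-front into terminal-delimited segments and strips them afterwards,
-- instead of A's forward character-accumulation loop; objective: alternative (same cost, different traversal).

-- ===== PORT A =====
def pyTermChars : List Char := ['。', '！', '？', '!', '?', '\n']

-- one iteration of A's `for char in text` loop: state = (units, current)
def stepA (st : List String × List Char) (char : Char) : List String × List Char :=
  let current := st.2 ++ [char]
  if pyTermChars.contains char || char == '\n' then
    (st.1 ++ [String.ofList (PySem.Chars.strip current)], [])
  else
    (st.1, current)

def split_text_units_py (text : String) : List String :=
  let st := text.toList.foldl stepA ([], [])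
  let units := if PySem.Chars.strip st.2 ≠ [] then
      st.1 ++ [String.ofList (PySem.Chars.strip st.2)]
    else st.1
  if units = [] then [text] else units

-- ===== PORT B =====
-- one iteration of B's backwards loop; state head = the segment currently being built
-- (Python's rsegs with its chars, kept in final order: cons here = Python's append on the reversed data)
def altStep (st : List (List Char)) (ch : Char) : List (List Char) :=
  if pyTermChars.contains ch then
    [ch] :: st
  else
    match st with
    | s :: rest => (ch :: s) :: rest
    | [] => [[ch]]   -- unreachable: the state starts nonempty and stays nonempty

def split_text_units_py_alt (text : String) : List String :=
  let segs := text.toList.reverse.foldl altStep [[]]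
  let units := segs.dropLast.map (fun s => String.ofList (PySem.Chars.strip s))
  let tail := PySem.Chars.strip (segs.getLastD [])
  let units2 := if tail ≠ [] then units ++ [String.ofList tail] else units
  if units2 = [] then [text] else units2

-- ===== PRECONDITION & SPEC =====
def Spec_split_text_units_py (text : String) (out : List String) : Prop := out = split_text_units_py_alt text
instance (text : String) (out : List String) : Decidable (Spec_split_text_units_py text out) := by unfold Spec_split_text_units_py; infer_instance

-- ===== CLAIM (what is proved, stated in full; the proofs are below) =====
def Claim_equal_split_text_units_py : Prop := ∀ (text : String), Dom_split_text_units_py text → Spec_split_text_units_py text (split_text_units_py text)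

-- ===== LEMMAS AND PROOFS =====

-- B's tokenizer as a function of the char list
def fb (l : List Char) : List (List Char) := l.reverse.foldl altStep [[]]

-- glue the pending prefix `cur` onto the first segment
def consHead (cur : List Char) : List (List Char) → List (List Char)
  | s :: rest => (cur ++ s) :: rest
  | [] => [cur]

theorem fb_nil : fb [] = [[]] := rfl

theorem fb_cons (c : Char) (cs : List Char) : fb (c :: cs) = altStep (fb cs) c := by
  simp [fb, List.foldl_append]

theorem fb_ne_nil (l : List Char) : fb l ≠ [] := by
  induction l with
  | nil => simp [fb_nil]
  | cons c cs ih =>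
    rw [fb_cons]
    unfold altStep
    split
    · simp
    · cases h : fb cs with
      | nil => exact absurd h ih
      | cons s rest => simp

theorem term_cond (c : Char) :
    (pyTermChars.contains c || c == '\n') = pyTermChars.contains c := by
  by_cases h : c = '\n' <;> simp [h, pyTermChars]

-- loop invariant: A's fold from any state equals B's segmentation of the remaining input
theorem mainInv (l : List Char) : ∀ (us : List String) (cur : List Char),
    l.foldl stepA (us, cur) =
      (us ++ (consHead cur (fb l)).dropLast.map (fun s => String.ofList (PySem.Chars.strip s)),
       (consHead cur (fb l)).getLastD []) := by
  induction l with
  | nil =>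
    intro us cur
    simp [fb_nil, consHead]
  | cons c cs ih =>
    intro us cur
    rw [List.foldl_cons, fb_cons]
    obtain ⟨s, rest, hfb⟩ : ∃ s rest, fb cs = s :: rest := by
      cases h : fb cs with
      | nil => exact absurd h (fb_ne_nil cs)
      | cons s rest => exact ⟨s, rest, rfl⟩
    by_cases h : pyTermChars.contains c = true
    · have hstep : stepA (us, cur) c =
          (us ++ [String.ofList (PySem.Chars.strip (cur ++ [c]))], []) := by
        unfold stepA; rw [term_cond, h]; simp
      rw [hstep, ih]
      unfold altStep
      rw [if_pos h, hfb]
      simp [consHead, List.getLastD]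
    · have h' : pyTermChars.contains c = false := by simpa using h
      have hstep : stepA (us, cur) c = (us, cur ++ [c]) := by
        unfold stepA; rw [term_cond, h']; simp
      rw [hstep, ih]
      unfold altStep
      rw [if_neg h, hfb]
      simp [consHead]

theorem consHead_nil_eq (l : List (List Char)) (h : l ≠ []) : consHead [] l = l := by
  cases l with
  | nil => exact absurd rfl h
  | cons s rest => simp [consHead]

-- ===== VERDICT (by name: the statement is the Claim_ definition above) =====
theorem split_text_units_py_spec : Claim_equal_split_text_units_py := by
  intro text _
  unfold Spec_split_text_units_py split_text_units_py split_text_units_py_alt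
  rw [show text.toList.foldl stepA ([], []) = _ from mainInv text.toList [] []]
  rw [consHead_nil_eq _ (fb_ne_nil text.toList)]
  rfl
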